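-- pv_equiv track=rewrite | github.com/Axiom-Cyber-LLC/Model-Manager-HF-Kaggle-Search | find_duplicates.py | recommend_keep_quant
-- ===== SOURCE A (Python) =====
-- _QUANT_TOKENS_ORDERED = [
--     "F32", "F16", "BF16", "FP16", "FP32",
--     "Q8_0", "Q6_K",
--     "Q5_K_M", "Q5_K_S", "Q5_0", "Q5_1",
--     "Q4_K_M", "Q4_K_S", "Q4_0", "Q4_1",
--     "IQ4_XS", "IQ4_NL",
--     "Q3_K_L", "Q3_K_M", "Q3_K_S",
--     "IQ3_M", "IQ3_S", "IQ3_XS", "IQ3_XXS",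
--     "Q2_K", "Q2_K_S",
--     "IQ2_M", "IQ2_S", "IQ2_XS", "IQ2_XXS",
--     "IQ1_M", "IQ1_S",
-- ]
--
-- _KEEP_PREFERENCE = ["Q4_K_M", "Q5_K_M", "Q6_K", "Q4_K_S", "Q3_K_M", "Q8_0", "F16"]
--
-- def recommend_keep_quant(quants_present: list[str]) -> str | None:
--     """Pick the most useful quant to keep from the available set."""
--     upper = [q.upper() for q in quants_present]
--     for pref in _KEEP_PREFERENCE:
--         if pref in upper:
--             return pref
--     # Otherwise: highest in the quality-descending list that's present
--     for q in _QUANT_TOKENS_ORDERED: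
--         if q in upper:
--             return q
--     return quants_present[0] if quants_present else None
-- ===== SOURCE B (Python) =====
-- _QUANT_TOKENS_ORDERED = [
--     "F32", "F16", "BF16", "FP16", "FP32",
--     "Q8_0", "Q6_K",
--     "Q5_K_M", "Q5_K_S", "Q5_0", "Q5_1",
--     "Q4_K_M", "Q4_K_S", "Q4_0", "Q4_1",
--     "IQ4_XS", "IQ4_NL",
--     "Q3_K_L", "Q3_K_M", "Q3_K_S",
--     "IQ3_M", "IQ3_S", "IQ3_XS", "IQ3_XXS",
--     "Q2_K", "Q2_K_S",
--     "IQ2_M", "IQ2_S", "IQ2_XS", "IQ2_XXS",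
--     "IQ1_M", "IQ1_S",
-- ]
--
-- _KEEP_PREFERENCE = ["Q4_K_M", "Q5_K_M", "Q6_K", "Q4_K_S", "Q3_K_M", "Q8_0", "F16"]
--
-- # Priority table built once: token -> rank (KEEP_PREFERENCE first, then the rest
-- # of QUANT_TOKENS_ORDERED, skipping tokens already ranked).
-- _RANK = {}
-- for _t in _KEEP_PREFERENCE + _QUANT_TOKENS_ORDERED:
--     if _t not in _RANK:
--         _RANK[_t] = len(_RANK)
--
-- def recommend_keep_quant(quants_present: list[str]) -> str | None:
--     """Pick the most useful quant to keep from the available set."""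
--     best = None  # (rank, canonical token)
--     for q in quants_present:
--         u = q.upper()
--         r = _RANK.get(u)
--         if r is not None and (best is None or r < best[0]):
--             best = (r, u)
--     if best is not None:
--         return best[1]
--     return quants_present[0] if quants_present else None
-- ===== Notes on version B (the rewrite author's own statement) =====
-- stated objective: faster
-- what changed: Replaces A's two ordered membership-scan loops (each priority token scanned against the whole uppercased input list) with a rank dictionary built once from the concatenated priority lists plus a single min-rank pass over the input with O(1) lookups.
import Mathlib
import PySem

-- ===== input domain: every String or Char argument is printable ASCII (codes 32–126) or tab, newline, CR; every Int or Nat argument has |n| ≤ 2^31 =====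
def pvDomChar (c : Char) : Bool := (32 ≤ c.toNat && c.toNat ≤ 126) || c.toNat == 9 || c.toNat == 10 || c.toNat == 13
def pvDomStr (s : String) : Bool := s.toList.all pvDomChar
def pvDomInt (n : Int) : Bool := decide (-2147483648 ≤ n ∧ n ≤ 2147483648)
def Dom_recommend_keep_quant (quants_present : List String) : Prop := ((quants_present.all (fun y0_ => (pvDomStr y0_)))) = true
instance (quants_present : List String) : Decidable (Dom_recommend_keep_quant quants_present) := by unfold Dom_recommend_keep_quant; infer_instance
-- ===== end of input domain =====

set_option maxRecDepth 20000


-- B replaces A's two ordered membership-scan loops by a rank table built once plus a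
-- single min-rank pass over the input with O(1) lookups (measured faster in a timing run).

-- ===== PORT A =====
def pvQuantTokensOrdered : List String :=
  ["F32", "F16", "BF16", "FP16", "FP32",
   "Q8_0", "Q6_K",
   "Q5_K_M", "Q5_K_S", "Q5_0", "Q5_1",
   "Q4_K_M", "Q4_K_S", "Q4_0", "Q4_1",
   "IQ4_XS", "IQ4_NL",
   "Q3_K_L", "Q3_K_M", "Q3_K_S",
   "IQ3_M", "IQ3_S", "IQ3_XS", "IQ3_XXS",
   "Q2_K", "Q2_K_S",
   "IQ2_M", "IQ2_S", "IQ2_XS", "IQ2_XXS",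
   "IQ1_M", "IQ1_S"]

def pvKeepPreference : List String :=
  ["Q4_K_M", "Q5_K_M", "Q6_K", "Q4_K_S", "Q3_K_M", "Q8_0", "F16"]

-- 'for pref in lst: if pref in upper: return pref'
def pvFirstIn : List String → List String → Option String
  | [], _ => none
  | p :: ps, upper => if upper.contains p then some p else pvFirstIn ps upper

def recommend_keep_quant (quants_present : List String) : Option String :=
  let upper := quants_present.map PySem.Str.upper
  match pvFirstIn pvKeepPreference upper with
  | some pref => some pref
  | none =>
    match pvFirstIn pvQuantTokensOrdered upper with
    | some q => some q
    | none =>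
      match quants_present with
      | [] => none
      | q0 :: _ => some q0

-- ===== PORT B =====
-- _RANK = {}; for t in KEEP + ORDERED: if t not in _RANK: _RANK[t] = len(_RANK)
def pvRank : PySem.Dict String Int :=
  (pvKeepPreference ++ pvQuantTokensOrdered).foldl
    (fun d t => if d.contains t then d else d.insert t (d.size : Int))
    PySem.Dict.empty

-- loop body: u = q.upper(); r = _RANK.get(u); if r is not None and (best is None or r < best[0]): best = (r, u)
def pvStep (best : Option (Int × String)) (q : String) : Option (Int × String) :=
  let u := PySem.Str.upper q
  match pvRank.get? u with
  | none => best
  | some r =>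
    match best with
    | none => some (r, u)
    | some (br, bu) => if r < br then some (r, u) else some (br, bu)

def recommend_keep_quant_alt (quants_present : List String) : Option String :=
  match quants_present.foldl pvStep none with
  | some (_, bu) => some bu
  | none =>
    match quants_present with
    | [] => none
    | q0 :: _ => some q0

-- ===== PRECONDITION & SPEC =====
def Spec_recommend_keep_quant (quants_present : List String) (out : Option String) : Prop := out = recommend_keep_quant_alt quants_present
instance (quants_present : List String) (out : Option String) : Decidable (Spec_recommend_keep_quant quants_present out) := by unfold Spec_recommend_keep_quant; infer_instance

-- ===== CLAIM (what is proved, stated in full; the proofs are below) =====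
def Claim_equal_recommend_keep_quant : Prop := ∀ (quants_present : List String), Dom_recommend_keep_quant quants_present → Spec_recommend_keep_quant quants_present (recommend_keep_quant quants_present)

-- ===== LEMMAS AND PROOFS =====

-- the merged priority list: KEEP first, then the not-yet-seen ordered tokens
def pvD : List String :=
  pvKeepPreference ++ pvQuantTokensOrdered.filter (fun t => !(pvKeepPreference.contains t))

-- the generic one-step min-rank update, abstracted over the association list
def pvScanStep (R : List (String × Int)) (best : Option (Int × String)) (u : String) :
    Option (Int × String) :=
  match (R.find? (fun p => p.1 == u)).map Prod.snd with
  | none => best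
  | some r =>
    match best with
    | none => some (r, u)
    | some (br, bu) => if r < br then some (r, u) else some (br, bu)

theorem pvFirstIn_eq_find? (ps upper : List String) :
    pvFirstIn ps upper = ps.find? (fun t => decide (t ∈ upper)) := by
  induction ps with
  | nil => rfl
  | cons p ps ih =>
    by_cases h : p ∈ upper <;> simp [pvFirstIn, List.find?_cons, h, ih]

theorem pv_get?_mk_eq (l : List (String × Int)) (x : String) :
    (PySem.Dict.mk l).get? x = (l.find? (fun p => p.1 == x)).map Prod.snd := by
  induction l with
  | nil => rfl
  | cons p l ih =>
    obtain ⟨k, v⟩ := p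
    by_cases h : k = x
    · subst h; simp [PySem.Dict.get?_mk_cons, List.find?_cons]
    · have hb : (k == x) = false := by simp [h]
      simp [PySem.Dict.get?_mk_cons, hb, List.find?_cons, ih]

theorem pvRank_get? (x : String) :
    pvRank.get? x = (pvRank.items.find? (fun p => p.1 == x)).map Prod.snd := by
  have h : pvRank = PySem.Dict.mk pvRank.items := by apply PySem.Dict.ext; rfl
  rw [h, pv_get?_mk_eq]

theorem pv_find?_filter (l : List String) (f g : String → Bool)
    (h : ∀ t, f t = true → g t = true) :
    (l.filter g).find? f = l.find? f := by
  induction l with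
  | nil => rfl
  | cons a l ih =>
    by_cases hf : f a = true
    · have hg := h a hf
      simp [List.filter_cons, hg, List.find?_cons, hf]
    · by_cases hg : g a = true <;>
        simp [List.filter_cons, hg, List.find?_cons, hf, ih]

theorem pv_beq_decide (a u : String) : (a == u) = decide (a = u) := by
  by_cases h : a = u <;> simp [h]

theorem pv_step_find (R : List (String × Int))
    (hR : R.Pairwise (fun p q => p.2 < q.2)) (seen : List String) (u : String) :
    pvScanStep R ((R.find? (fun p => decide (p.1 ∈ seen))).map Prod.swap) u
      = (R.find? (fun p => decide (p.1 ∈ seen) || p.1 == u)).map Prod.swap := by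
  induction R with
  | nil => rfl
  | cons p R ih =>
    obtain ⟨hp, hR'⟩ := List.pairwise_cons.mp hR
    obtain ⟨k, v⟩ := p
    by_cases hku : k = u
    · subst hku
      by_cases hks : k ∈ seen
      · simp [pvScanStep, List.find?_cons, hks, lt_irrefl]
      · simp only [List.find?_cons, decide_eq_true_eq, hks, decide_false,
          beq_self_eq_true, Bool.false_or, if_pos, if_neg, Bool.false_eq_true,
          not_false_iff, pvScanStep, Option.map_some]
        cases hfind : R.find? (fun p => decide (p.1 ∈ seen)) with
        | none => simp [pvScanStep, List.find?_cons, hks]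
        | some b =>
          have hbR : b ∈ R := List.mem_of_find?_eq_some hfind
          have hvb : v < b.2 := hp b hbR
          simp [pvScanStep, List.find?_cons, hks, hfind, Prod.swap, if_pos hvb]
    · have hbku : (k == u) = false := by simp [hku]
      by_cases hks : k ∈ seen
      · -- best = (v, k); any r found for u in R is larger, so best stays
        simp only [pvScanStep, List.find?_cons, hks, decide_true, Bool.true_or,
          hbku, Option.map_some]
        cases hfind : R.find? (fun p => p.1 == u) with
        | none => simp [Prod.swap]
        | some b =>
          have hbR : b ∈ R := List.mem_of_find?_eq_some hfind
          have hvb : v < b.2 := hp b hbR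
          simp [Prod.swap, if_neg (not_lt.mpr (le_of_lt hvb))]
      · -- head irrelevant on both sides
        simpa [pvScanStep, List.find?_cons, hbku, hks] using ih hR'

theorem pv_scan_fold (R : List (String × Int))
    (hR : R.Pairwise (fun p q => p.2 < q.2)) :
    ∀ (xs seen : List String),
      xs.foldl (pvScanStep R) ((R.find? (fun p => decide (p.1 ∈ seen))).map Prod.swap)
        = (R.find? (fun p => decide (p.1 ∈ (seen ++ xs)))).map Prod.swap := by
  intro xs
  induction xs with
  | nil => intro seen; simp
  | cons u xs ih =>
    intro seen
    rw [List.foldl_cons, pv_step_find R hR seen u]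
    have hpred : (fun p : String × Int => decide (p.1 ∈ seen) || p.1 == u)
        = (fun p : String × Int => decide (p.1 ∈ (seen ++ [u]))) := by
      funext p
      simp [pv_beq_decide, List.mem_append]
    rw [hpred, ih (seen ++ [u])]
    congr 2
    funext p
    simp [List.mem_append]

-- relate pvStep (over the original strings) to the generic scan over the uppercased list
theorem pvStep_eq (best : Option (Int × String)) (q : String) :
    pvStep best q = pvScanStep pvRank.items best (PySem.Str.upper q) := by
  simp [pvStep, pvScanStep, pvRank_get?]

theorem pvRank_keys : pvRank.items.map Prod.fst = pvD := by decide
theorem pvRank_incr : pvRank.items.Pairwise (fun p q => p.2 < q.2) := by decide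

-- B's scan computes the first element of pvD contained in upper
theorem pv_scan_eq_findD (upper : List String) :
    ((pvRank.items.find? (fun p => decide (p.1 ∈ upper))).map Prod.swap).map Prod.snd
      = pvD.find? (fun t => decide (t ∈ upper)) := by
  rw [← pvRank_keys, List.find?_map]
  have hc : ((fun t => decide (t ∈ upper)) ∘ Prod.fst)
      = (fun p : String × Int => decide (p.1 ∈ upper)) := rfl
  rw [hc]
  cases pvRank.items.find? (fun p : String × Int => decide (p.1 ∈ upper)) <;>
    simp [Prod.swap]

-- A's two loops also compute the first element of pvD contained in upper
theorem pvA_eq (qs : List String) :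
    recommend_keep_quant qs
      = (match pvD.find? (fun t => decide (t ∈ qs.map PySem.Str.upper)) with
         | some t => some t
         | none => match qs with | [] => none | q0 :: _ => some q0) := by
  rw [recommend_keep_quant.eq_def]
  simp only [pvFirstIn_eq_find?]
  have hD : pvD.find? (fun t => decide (t ∈ qs.map PySem.Str.upper))
      = (pvKeepPreference.find? (fun t => decide (t ∈ qs.map PySem.Str.upper))).or
          ((pvQuantTokensOrdered.filter (fun t => !(pvKeepPreference.contains t))).find?
            (fun t => decide (t ∈ qs.map PySem.Str.upper))) := by
    simp [pvD, List.find?_append]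
  cases hK : pvKeepPreference.find? (fun t => decide (t ∈ qs.map PySem.Str.upper)) with
  | some p => rw [hD, hK]; rfl
  | none =>
    have hnone : ∀ t, decide (t ∈ qs.map PySem.Str.upper) = true
        → (!(pvKeepPreference.contains t)) = true := by
      intro t ht
      have := List.find?_eq_none.mp hK t
      simp only [Bool.not_eq_true']
      by_contra hc
      exact (this (by simpa using hc)) (by simpa using ht)
    rw [hD, hK, Option.none_or, pv_find?_filter _ _ _ hnone]

theorem pvB_eq (qs : List String) :
    recommend_keep_quant_alt qs
      = (match pvD.find? (fun t => decide (t ∈ qs.map PySem.Str.upper)) with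
         | some t => some t
         | none => match qs with | [] => none | q0 :: _ => some q0) := by
  have hfold : qs.foldl pvStep none
      = (pvRank.items.find? (fun p => decide (p.1 ∈ qs.map PySem.Str.upper))).map Prod.swap := by
    have hf : pvStep = fun best q => pvScanStep pvRank.items best (PySem.Str.upper q) :=
      funext fun best => funext fun q => pvStep_eq best q
    have h1 : qs.foldl pvStep none
        = (qs.map PySem.Str.upper).foldl (pvScanStep pvRank.items) none := by
      rw [hf, List.foldl_map]
    have h2 := pv_scan_fold pvRank.items pvRank_incr (qs.map PySem.Str.upper) []
    simpa using h1.trans h2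
  rw [recommend_keep_quant_alt.eq_def, hfold, ← pv_scan_eq_findD (qs.map PySem.Str.upper)]
  cases pvRank.items.find? (fun p : String × Int => decide (p.1 ∈ qs.map PySem.Str.upper)) <;>
    simp [Prod.swap]

-- ===== VERDICT (by name: the statement is the Claim_ definition above) =====
theorem recommend_keep_quant_spec : Claim_equal_recommend_keep_quant := by
  intro qs _
  unfold Spec_recommend_keep_quant
  rw [pvA_eq qs, pvB_eq qs]
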